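-- pv_equiv track=rewrite | github.com/bianyh/ChartInt | complex/O_MeC.py | generate_lookup_table
-- ===== SOURCE A (Python) =====
-- def generate_lookup_table(color_names, lab_values, threshold=25):
--     sorted_colors_labs = sorted(zip(color_names, lab_values), key=lambda x: x[1][0])
--     sorted_color_names, sorted_lab_values = zip(*sorted_colors_labs)
--
--     checked = [False] * len(sorted_color_names)
--     lookup_table = {}
--
--     for i in range(len(sorted_color_names)):
--         if not checked[i]:
--             lookup_table[sorted_color_names[i]] = []
--             for j in range(i + 1, len(sorted_color_names)):
--                 if not checked[j]:
--                     if abs(sorted_lab_values[i][0] - sorted_lab_values[j][0]) < threshold: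
--                         lookup_table[sorted_color_names[i]].append(sorted_color_names[j])
--                         checked[j] = True
--             checked[i] = True
--
--     for color in sorted_color_names:
--         if color not in lookup_table:
--             lookup_table[color] = []
--
--     return lookup_table
-- ===== SOURCE B (Python) =====
-- def generate_lookup_table(color_names, lab_values, threshold=25):
--     pairs = sorted(zip(color_names, lab_values), key=lambda p: p[1][0])
--     names = [p[0] for p in pairs]
--     ls = [p[1][0] for p in pairs]
--     n = len(names)
--     table = {}
--     i = 0
--     while i < n:
--         j = i + 1
--         while j < n and ls[j] - ls[i] < threshold:
--             j += 1
--         table[names[i]] = names[i + 1:j]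
--         i = j
--     for name in names:
--         if name not in table:
--             table[name] = []
--     return table
-- ===== Notes on version B (the rewrite author's own statement) =====
-- stated objective: alternative
-- what changed: Replaces the checked-array nested scan with a single linear sweep over the L-sorted list that emits each greedy group as one contiguous block (the groups are provably contiguous after sorting).
-- crash fix: When color_names or lab_values is empty, A raises ValueError at zip(*...) while B returns the empty dict. — e.g. on generate_lookup_table(["red"], [], 25): A raises ValueError, B returns []
import Mathlib
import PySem

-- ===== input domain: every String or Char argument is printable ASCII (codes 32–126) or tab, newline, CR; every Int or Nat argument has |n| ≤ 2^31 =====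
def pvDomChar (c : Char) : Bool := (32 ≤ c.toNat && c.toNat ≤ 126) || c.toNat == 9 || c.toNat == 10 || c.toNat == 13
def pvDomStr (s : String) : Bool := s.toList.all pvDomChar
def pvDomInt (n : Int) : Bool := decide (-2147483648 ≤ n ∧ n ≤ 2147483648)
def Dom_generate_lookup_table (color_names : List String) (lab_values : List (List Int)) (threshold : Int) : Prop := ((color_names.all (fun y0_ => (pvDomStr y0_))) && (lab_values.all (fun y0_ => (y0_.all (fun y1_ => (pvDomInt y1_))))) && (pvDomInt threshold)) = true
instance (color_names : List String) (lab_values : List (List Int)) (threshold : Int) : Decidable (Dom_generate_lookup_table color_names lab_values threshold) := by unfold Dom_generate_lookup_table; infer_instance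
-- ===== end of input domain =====

-- B replaces A's checked-array nested scan with a single linear sweep over the L-sorted
-- list that emits each (provably contiguous) greedy group as one block: objective = alternative.

-- ===== PORT A =====
-- inner loop body: for j …: if not checked[j]: if abs(lab[i][0]-lab[j][0]) < threshold: append, checked[j]=True
def aInnerStep (names : List String) (labs : List (List Int)) (threshold : Int) (i : Nat)
    (st : List Bool × PySem.Dict String (List String)) (j : Nat) :
    List Bool × PySem.Dict String (List String) :=
  if st.1.getD j false = false then
    if |PySem.List.pyGetD (labs.getD i []) 0 0 - PySem.List.pyGetD (labs.getD j []) 0 0| < threshold then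
      (st.1.set j true, st.2.modify (names.getD i "") [] (fun l => l ++ [names.getD j ""]))
    else st
  else st

-- outer loop body: if not checked[i]: table[name_i]=[]; inner loop; checked[i]=True
def aOuterStep (names : List String) (labs : List (List Int)) (threshold : Int)
    (st : List Bool × PySem.Dict String (List String)) (i : Nat) :
    List Bool × PySem.Dict String (List String) :=
  if st.1.getD i false = false then
    let st2 := (List.range' (i+1) (names.length - (i+1))).foldl
      (aInnerStep names labs threshold i) (st.1, st.2.insert (names.getD i "") [])
    (st2.1.set i true, st2.2)
  else st

def generate_lookup_table (color_names : List String) (lab_values : List (List Int)) (threshold : Int) : List (String × List String) :=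
  -- sorted(zip(...), key=lambda x: x[1][0]); x[1][0] ported as pyGetD _ 0 0 (exact under Pre_: inner lists nonempty)
  let pairs := PySem.List.sorted (color_names.zip lab_values) (fun p => PySem.List.pyGetD p.2 0 0)
  let names := pairs.map (fun p => p.1)
  let labs := pairs.map (fun p => p.2)
  let st := (List.range names.length).foldl (aOuterStep names labs threshold)
      (List.replicate names.length false, PySem.Dict.empty)
  -- for color in sorted_color_names: if color not in lookup_table: lookup_table[color] = []
  (names.foldl (fun d c => if d.contains c then d else d.insert c []) st.2).items

-- ===== PORT B =====
-- while j < n and ls[j] - ls[i] < threshold: j += 1   (fuel = remaining loop bound, standard total-loop idiom)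
def bFindEnd (ls : List Int) (n : Nat) (threshold li : Int) : Nat → Nat → Nat
  | 0, j => j
  | fuel+1, j =>
    if j < n ∧ ls.getD j 0 - li < threshold then bFindEnd ls n threshold li fuel (j+1) else j

-- while i < n: find block end j, emit names[i] -> names[i+1:j], jump to j   (≤ n iterations, fuel = n)
def bSweep (names : List String) (ls : List Int) (threshold : Int) :
    Nat → Nat → PySem.Dict String (List String) → PySem.Dict String (List String)
  | 0, _, d => d
  | fuel+1, i, d =>
    if i < names.length then
      let j := bFindEnd ls names.length threshold (ls.getD i 0) names.length (i+1)
      bSweep names ls threshold fuel j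
        (d.insert (names.getD i "") (PySem.List.slice names (some ((i:Int)+1)) (some (j:Int))))
    else d

def generate_lookup_table_alt (color_names : List String) (lab_values : List (List Int)) (threshold : Int) : List (String × List String) :=
  let pairs := PySem.List.sorted (color_names.zip lab_values) (fun p => PySem.List.pyGetD p.2 0 0)
  let names := pairs.map (fun p => p.1)
  let ls := pairs.map (fun p => PySem.List.pyGetD p.2 0 0)
  let d := bSweep names ls threshold names.length 0 PySem.Dict.empty
  (names.foldl (fun d c => if d.contains c then d else d.insert c []) d).items

-- ===== PRECONDITION & SPEC =====
-- Pre_ excludes exactly the inputs where the Python A raises: zip(*[]) raises ValueError when the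
-- zipped list is empty, and the sort key x[1][0] raises IndexError when a zipped lab list is empty.
def Pre_generate_lookup_table (color_names : List String) (lab_values : List (List Int)) (threshold : Int) : Prop :=
  color_names.zip lab_values ≠ [] ∧ ∀ p ∈ color_names.zip lab_values, p.2 ≠ []
instance (color_names : List String) (lab_values : List (List Int)) (threshold : Int) : Decidable (Pre_generate_lookup_table color_names lab_values threshold) := by unfold Pre_generate_lookup_table; infer_instance

def pvWitness_generate_lookup_table : List String × List (List Int) × Int :=
  (["red", "pink", "blue"], [[10, 1, 1], [20, 2, 2], [90, 3, 3]], 25)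

-- When color_names or lab_values is empty, A raises ValueError at zip(*...) while B returns the empty dict.
def Raises_generate_lookup_table (color_names : List String) (lab_values : List (List Int)) (threshold : Int) : Prop :=
  color_names = [] ∨ lab_values = []
instance (color_names : List String) (lab_values : List (List Int)) (threshold : Int) : Decidable (Raises_generate_lookup_table color_names lab_values threshold) := by unfold Raises_generate_lookup_table; infer_instance
def pvRaiseWitness_generate_lookup_table : List String × List (List Int) × Int := (["red"], [], 25)
def pvRaiseWitnessOut_generate_lookup_table : List (String × List String) := []

def Spec_generate_lookup_table (color_names : List String) (lab_values : List (List Int)) (threshold : Int) (out : List (String × List String)) : Prop := out = generate_lookup_table_alt color_names lab_values threshold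
instance (color_names : List String) (lab_values : List (List Int)) (threshold : Int) (out : List (String × List String)) : Decidable (Spec_generate_lookup_table color_names lab_values threshold out) := by unfold Spec_generate_lookup_table; infer_instance

-- ===== CLAIM (what is proved, stated in full; the proofs are below) =====
def Claim_equal_generate_lookup_table : Prop := ∀ (color_names : List String) (lab_values : List (List Int)) (threshold : Int), Dom_generate_lookup_table color_names lab_values threshold → Pre_generate_lookup_table color_names lab_values threshold → Spec_generate_lookup_table color_names lab_values threshold (generate_lookup_table color_names lab_values threshold)

def Claim_raises_generate_lookup_table : Prop := (∀ (color_names : List String) (lab_values : List (List Int)) (threshold : Int), Dom_generate_lookup_table color_names lab_values threshold → Raises_generate_lookup_table color_names lab_values threshold → ¬ Pre_generate_lookup_table color_names lab_values threshold) ∧ (Dom_generate_lookup_table (pvRaiseWitness_generate_lookup_table.1) (pvRaiseWitness_generate_lookup_table.2.1) (pvRaiseWitness_generate_lookup_table.2.2) ∧ Raises_generate_lookup_table (pvRaiseWitness_generate_lookup_table.1) (pvRaiseWitness_generate_lookup_table.2.1) (pvRaiseWitness_generate_lookup_table.2.2) ∧ generate_lookup_table_alt (pvRaiseWitness_generate_lookup_table.1)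 (pvRaiseWitness_generate_lookup_table.2.1) (pvRaiseWitness_generate_lookup_table.2.2) = pvRaiseWitnessOut_generate_lookup_table)

-- ===== LEMMAS AND PROOFS =====

theorem dict_modify_insert (d : PySem.Dict String (List String)) (k : String) (v d0 : List String)
    (f : List String → List String) :
    (d.insert k v).modify k d0 f = d.insert k (f v) := by
  show ((d.insert k v).insert k (f ((d.insert k v).getD k d0))) = d.insert k (f v)
  rw [PySem.Dict.getD_insert_self, PySem.Dict.insert_insert_self]

theorem getD_set_bool (l : List Bool) (j k : Nat) :
    (l.set j true).getD k false = if j = k ∧ j < l.length then true else l.getD k false := by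
  simp only [List.getD_eq_getElem?_getD, List.getElem?_set]
  by_cases hjk : j = k
  · subst hjk
    by_cases hl : j < l.length
    · simp [hl]
    · have : l[j]? = none := by rw [List.getElem?_eq_none_iff]; omega
      simp [hl, this]
  · simp [hjk]

theorem getD_replicate_false (n k : Nat) :
    (List.replicate n false).getD k false = false := by
  simp only [List.getD_eq_getElem?_getD]
  by_cases h : k < n
  · simp [h]
  · have h2 : (List.replicate n false)[k]? = none := by
      rw [List.getElem?_eq_none_iff]; simp; omega
    simp [h2]

theorem bFindEnd_ge (ls : List Int) (n : Nat) (threshold li : Int) :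
    ∀ fuel j, j ≤ bFindEnd ls n threshold li fuel j := by
  intro fuel
  induction fuel with
  | zero => intro j; exact Nat.le_refl j
  | succ f ih =>
    intro j
    simp only [bFindEnd]
    split
    · exact Nat.le_trans (by omega) (ih (j+1))
    · exact Nat.le_refl j

theorem bFindEnd_le_n (ls : List Int) (n : Nat) (threshold li : Int) :
    ∀ fuel j, j ≤ n → bFindEnd ls n threshold li fuel j ≤ n := by
  intro fuel
  induction fuel with
  | zero => intro j h; exact h
  | succ f ih =>
    intro j h
    simp only [bFindEnd]
    split
    · next hc => exact ih (j+1) (by omega)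
    · exact h

theorem bFindEnd_mem (ls : List Int) (n : Nat) (threshold li : Int) :
    ∀ fuel j, ∀ k, j ≤ k → k < bFindEnd ls n threshold li fuel j →
      k < n ∧ ls.getD k 0 - li < threshold := by
  intro fuel
  induction fuel with
  | zero =>
    intro j k h1 h2
    simp only [bFindEnd] at h2
    omega
  | succ f ih =>
    intro j k h1 h2
    simp only [bFindEnd] at h2
    split at h2
    · next hc =>
      by_cases hkj : k = j
      · subst hkj; exact ⟨hc.1, hc.2⟩
      · exact ih (j+1) k (by omega) h2
    · omega

theorem bFindEnd_stop (ls : List Int) (n : Nat) (threshold li : Int) :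
    ∀ fuel j, n - j ≤ fuel → bFindEnd ls n threshold li fuel j < n →
      ¬ (ls.getD (bFindEnd ls n threshold li fuel j) 0 - li < threshold) := by
  intro fuel
  induction fuel with
  | zero =>
    intro j hf he
    simp only [bFindEnd] at he ⊢
    omega
  | succ f ih =>
    intro j hf he
    simp only [bFindEnd] at he ⊢
    split at he
    · next hc =>
      rw [if_pos hc]
      exact ih (j+1) (by omega) he
    · next hc =>
      rw [if_neg hc]
      intro h
      exact hc ⟨he, h⟩

theorem bSweep_stop (names : List String) (ls : List Int) (threshold : Int) :
    ∀ fuel i d, names.length ≤ i → bSweep names ls threshold fuel i d = d := by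
  intro fuel i d h
  cases fuel with
  | zero => rfl
  | succ f =>
    simp only [bSweep]
    rw [if_neg (by omega)]

-- the L-value A reads at index k (proof-only abbreviation)
def LA (labs : List (List Int)) (k : Nat) : Int := PySem.List.pyGetD (labs.getD k []) 0 0

-- A's inner j-loop, started at any j ≥ i+1 with checked ≡ (k < min j e ∧ k ≠ i), finishes with
-- checked ≡ (k < e ∧ k ≠ i) and table entry names[i] ↦ names[i+1..e), e = B's block end.
theorem innerA_loop (names : List String) (labs : List (List Int)) (ls : List Int) (threshold : Int)
    (i e : Nat) (t : PySem.Dict String (List String))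
    (hin : i < names.length)
    (hls : ∀ k, k < names.length → ls.getD k 0 = LA labs k)
    (mono : ∀ a b, a ≤ b → b < names.length → LA labs a ≤ LA labs b)
    (he : e = bFindEnd ls names.length threshold (ls.getD i 0) names.length (i+1))
    (hele : i + 1 ≤ e) (hen : e ≤ names.length) :
    ∀ m j (checked : List Bool), names.length - j ≤ m → i+1 ≤ j →
      checked.length = names.length →
      (∀ k, checked.getD k false = (decide (k < min j e) && !(decide (k = i)))) →
      ∃ checked' : List Bool,
        (List.range' j (names.length - j)).foldl (aInnerStep names labs threshold i)
          (checked, t.insert (names.getD i "") ((names.drop (i+1)).take (min j e - (i+1))))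
        = (checked', t.insert (names.getD i "") ((names.drop (i+1)).take (e - (i+1))))
        ∧ checked'.length = names.length
        ∧ (∀ k, checked'.getD k false = (decide (k < e) && !(decide (k = i)))) := by
  intro m
  induction m with
  | zero =>
    intro j checked hm hij hlen hchar
    have hnj : names.length ≤ j := by omega
    have hej : min j e = e := by omega
    refine ⟨checked, ?_, hlen, ?_⟩
    · rw [Nat.sub_eq_zero_of_le hnj]
      simp only [List.range'_zero, List.foldl_nil]
      rw [hej]
    · intro k; rw [← hej]; exact hchar k
  | succ m ih =>
    intro j checked hm hij hlen hchar
    by_cases hjn : j < names.length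
    · -- one step at index j
      have hrange : names.length - j = (names.length - (j+1)) + 1 := by omega
      rw [hrange, List.range'_succ, List.foldl_cons]
      have hcj : checked.getD j false = false := by
        rw [hchar j]
        have h1 : ¬ (j < min j e) := by omega
        simp [h1]
      by_cases hje : j < e
      · -- inside the block: condition true, mark j, append names[j]
        have hmem := bFindEnd_mem ls names.length threshold (ls.getD i 0)
          names.length (i+1) j hij (he ▸ hje)
        have hlt : LA labs j - LA labs i < threshold := by
          rw [← hls j hjn, ← hls i hin]; exact hmem.2
        have hmo : LA labs i ≤ LA labs j := mono i j (by omega) hjn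
        have hcond : |LA labs i - LA labs j| < threshold := by
          rw [abs_sub_comm, abs_of_nonneg (by omega)]
          omega
        have hstep : aInnerStep names labs threshold i
            (checked, t.insert (names.getD i "") ((names.drop (i+1)).take (min j e - (i+1)))) j
            = (checked.set j true,
               t.insert (names.getD i "") ((names.drop (i+1)).take (min (j+1) e - (i+1)))) := by
          simp only [aInnerStep, hcj, if_true, LA] at *
          rw [if_pos hcond, dict_modify_insert]
          have hminj : min j e = j := by omega
          have hminj1 : min (j+1) e = j + 1 := by omega
          rw [hminj, hminj1]
          congr 1
          have harith : j + 1 - (i+1) = (j - (i+1)) + 1 := by omega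
          rw [harith, List.take_add_one]
          congr 1
          have hidx : (names.drop (i+1))[j - (i+1)]? = some (names.getD j "") := by
            rw [List.getElem?_drop]
            have : i + 1 + (j - (i+1)) = j := by omega
            rw [this]
            rw [List.getElem?_eq_getElem hjn]
            rw [List.getD_eq_getElem?_getD, List.getElem?_eq_getElem hjn]
            rfl
          rw [hidx]
          rfl
        rw [hstep]
        exact ih (j+1) (checked.set j true) (by omega) (by omega)
          (by rw [List.length_set]; exact hlen)
          (by
            intro k
            rw [getD_set_bool]
            by_cases hkj : j = k
            · subst hkj
              rw [if_pos ⟨rfl, by omega⟩]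
              have h1 : j < min (j+1) e := by omega
              have h2 : ¬ (j = i) := by omega
              simp [h1, h2]
            · rw [if_neg (by tauto)]
              rw [hchar k]
              congr 1
              by_cases hk : k < min j e
              · have h1 : k < min (j+1) e := by omega
                simp [hk, h1]
              · have h1 : ¬ (k < min (j+1) e) := by omega
                simp [hk, h1])
      · -- past the block: condition false, nothing changes
        have hen' : e < names.length := by omega
        have hstop := bFindEnd_stop ls names.length threshold (ls.getD i 0)
          names.length (i+1) (by omega) (he ▸ hen')
        rw [← he] at hstop
        have hge : threshold ≤ LA labs e - LA labs i := by
          rw [← hls e hen', ← hls i hin]; omega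
        have hmoej : LA labs e ≤ LA labs j := mono e j (by omega) hjn
        have hmoij : LA labs i ≤ LA labs j := mono i j (by omega) hjn
        have hcond : ¬ (|LA labs i - LA labs j| < threshold) := by
          rw [abs_sub_comm, abs_of_nonneg (by omega)]
          omega
        have hstep : aInnerStep names labs threshold i
            (checked, t.insert (names.getD i "") ((names.drop (i+1)).take (min j e - (i+1)))) j
            = (checked, t.insert (names.getD i "") ((names.drop (i+1)).take (min j e - (i+1)))) := by
          simp only [aInnerStep, hcj, if_true, LA] at *
          rw [if_neg hcond]
        rw [hstep]
        have hminjj : min j e = min (j+1) e := by omega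
        rw [hminjj]
        exact ih (j+1) checked (by omega) (by omega) hlen
          (by intro k; rw [hchar k, hminjj])
    · -- j ≥ n: loop is empty
      have hej : min j e = e := by omega
      refine ⟨checked, ?_, hlen, ?_⟩
      · have hz : names.length - j = 0 := by omega
        rw [hz]
        simp only [List.range'_zero, List.foldl_nil]
        rw [hej]
      · intro k; rw [← hej]; exact hchar k

-- A's outer i-loop from i with checked ≡ (k < b), i ≤ b: the table it builds is B's sweep from b.
theorem outerA_loop (names : List String) (labs : List (List Int)) (ls : List Int) (threshold : Int)
    (hls : ∀ k, k < names.length → ls.getD k 0 = LA labs k)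
    (mono : ∀ a b, a ≤ b → b < names.length → LA labs a ≤ LA labs b) :
    ∀ m i b (checked : List Bool) (t : PySem.Dict String (List String)) (fuel : Nat),
      names.length - i ≤ m → i ≤ b → b ≤ names.length → names.length - b ≤ fuel →
      checked.length = names.length →
      (∀ k, checked.getD k false = decide (k < b)) →
      ((List.range' i (names.length - i)).foldl (aOuterStep names labs threshold) (checked, t)).2
        = bSweep names ls threshold fuel b t := by
  intro m
  induction m with
  | zero =>
    intro i b checked t fuel hm hib hbn hfuel hlen hchar
    have hz : names.length - i = 0 := by omega
    rw [hz]
    simp only [List.range'_zero, List.foldl_nil]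
    rw [bSweep_stop names ls threshold fuel b t (by omega)]
  | succ m ih =>
    intro i b checked t fuel hm hib hbn hfuel hlen hchar
    by_cases hin : i < names.length
    · have hrange : names.length - i = (names.length - (i+1)) + 1 := by omega
      rw [hrange, List.range'_succ, List.foldl_cons]
      by_cases hibe : i < b
      · -- checked[i] is true: skip
        have hstep : aOuterStep names labs threshold (checked, t) i = (checked, t) := by
          simp only [aOuterStep]
          rw [if_neg (by rw [hchar i]; simp [hibe])]
        rw [hstep]
        exact ih (i+1) b checked t fuel (by omega) (by omega) hbn hfuel hlen hchar
      · -- i = b: a block leader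
        have hbi : b = i := by omega
        subst hbi
        have hci : checked.getD b false = false := by rw [hchar b]; simp
        have hele : b + 1 ≤ bFindEnd ls names.length threshold (ls.getD b 0) names.length (b+1) :=
          bFindEnd_ge ls names.length threshold (ls.getD b 0) names.length (b+1)
        have hen : bFindEnd ls names.length threshold (ls.getD b 0) names.length (b+1) ≤ names.length :=
          bFindEnd_le_n ls names.length threshold (ls.getD b 0) names.length (b+1) (by omega)
        obtain ⟨checked', hfold, hlen', hchar'⟩ :=
          innerA_loop names labs ls threshold b
            (bFindEnd ls names.length threshold (ls.getD b 0) names.length (b+1)) t hin hls mono rfl hele hen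
            (names.length - (b+1)) (b+1) checked (le_refl _) (le_refl _) hlen
            (by
              intro k
              rw [hchar k]
              have hmin : min (b+1) (bFindEnd ls names.length threshold (ls.getD b 0) names.length (b+1)) = b+1 := by
                omega
              rw [hmin]
              by_cases hk : k = b
              · subst hk; simp
              · by_cases hkb : k < b
                · have : k < b + 1 := by omega
                  simp [hkb, this, hk]
                · have h1 : ¬ (k < b) := hkb
                  have h2 : ¬ (k < b + 1) := by omega
                  simp [h1, h2])
        have hstep : aOuterStep names labs threshold (checked, t) b
            = (checked'.set b true,
               t.insert (names.getD b "")
                 ((names.drop (b+1)).take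
                   (bFindEnd ls names.length threshold (ls.getD b 0) names.length (b+1) - (b+1)))) := by
          simp only [aOuterStep]
          rw [if_pos hci]
          have h0 : (t.insert (names.getD b "") ([] : List String))
              = t.insert (names.getD b "")
                  ((names.drop (b+1)).take
                    (min (b+1) (bFindEnd ls names.length threshold (ls.getD b 0) names.length (b+1)) - (b+1))) := by
            have hmin : min (b+1) (bFindEnd ls names.length threshold (ls.getD b 0) names.length (b+1)) = b+1 := by
              omega
            rw [hmin]
            simp
          rw [h0, hfold]
        rw [hstep]
        obtain ⟨f, rfl⟩ : ∃ f, fuel = f + 1 := ⟨fuel - 1, by omega⟩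
        have hrec := ih (b+1) (bFindEnd ls names.length threshold (ls.getD b 0) names.length (b+1))
          (checked'.set b true)
          (t.insert (names.getD b "")
            ((names.drop (b+1)).take
              (bFindEnd ls names.length threshold (ls.getD b 0) names.length (b+1) - (b+1))))
          f (by omega) (by omega) hen (by omega)
          (by rw [List.length_set]; exact hlen')
          (by
            intro k
            rw [getD_set_bool]
            by_cases hkb : b = k
            · subst hkb
              rw [if_pos ⟨rfl, by omega⟩]
              have hblt : b < bFindEnd ls names.length threshold (ls.getD b 0) names.length (b+1) := by
                omega
              rw [decide_eq_true hblt]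
            · rw [if_neg (by tauto), hchar' k,
                 decide_eq_false (show ¬ k = b from fun h => hkb h.symm)]
              rw [Bool.not_false, Bool.and_true])
        rw [hrec]
        have hR : bSweep names ls threshold (f+1) b t
            = bSweep names ls threshold f
                (bFindEnd ls names.length threshold (ls.getD b 0) names.length (b+1))
                (t.insert (names.getD b "")
                  (PySem.List.slice names (some ((b:Int)+1))
                    (some ((bFindEnd ls names.length threshold (ls.getD b 0) names.length (b+1) : Nat) : Int)))) := by
          simp only [bSweep]
          rw [if_pos hin]
        rw [hR]
        have hcast : ((b:Int)+1) = (((b+1 : Nat)) : Int) := by push_cast; ring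
        rw [hcast, PySem.List.slice_natCast]
    · -- i ≥ n
      have hz : names.length - i = 0 := by omega
      rw [hz]
      simp only [List.range'_zero, List.foldl_nil]
      rw [bSweep_stop names ls threshold fuel b t (by omega)]

theorem generate_lookup_table_spec : Claim_equal_generate_lookup_table := by
  intro cn lv th hdom hpre
  unfold Spec_generate_lookup_table
  simp only [generate_lookup_table, generate_lookup_table_alt]
  suffices h :
      ((List.range ((PySem.List.sorted (cn.zip lv) (fun p => PySem.List.pyGetD p.2 0 0)).map
          (fun p => p.1)).length).foldl
        (aOuterStep ((PySem.List.sorted (cn.zip lv) (fun p => PySem.List.pyGetD p.2 0 0)).map (fun p => p.1))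
          ((PySem.List.sorted (cn.zip lv) (fun p => PySem.List.pyGetD p.2 0 0)).map (fun p => p.2)) th)
        (List.replicate ((PySem.List.sorted (cn.zip lv) (fun p => PySem.List.pyGetD p.2 0 0)).map
          (fun p => p.1)).length false, PySem.Dict.empty)).2
      = bSweep ((PySem.List.sorted (cn.zip lv) (fun p => PySem.List.pyGetD p.2 0 0)).map (fun p => p.1))
          ((PySem.List.sorted (cn.zip lv) (fun p => PySem.List.pyGetD p.2 0 0)).map
            (fun p => PySem.List.pyGetD p.2 0 0)) th
          ((PySem.List.sorted (cn.zip lv) (fun p => PySem.List.pyGetD p.2 0 0)).map (fun p => p.1)).length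
          0 PySem.Dict.empty by
    rw [h]
  set pairs := PySem.List.sorted (cn.zip lv) (fun p => PySem.List.pyGetD p.2 0 0) with hpairs
  have hLA : ∀ k, k < pairs.length →
      LA (pairs.map (fun p => p.2)) k = PySem.List.pyGetD pairs[k]!.2 0 0 := by
    intro k hk
    unfold LA
    rw [List.getD_eq_getElem?_getD, List.getElem?_map, List.getElem?_eq_getElem hk]
    simp [getElem!_pos, hk]
  have hlen1 : (pairs.map (fun p : String × List Int => p.1)).length = pairs.length := by
    rw [List.length_map]
  have hls : ∀ k, k < (pairs.map (fun p : String × List Int => p.1)).length →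
      (pairs.map (fun p => PySem.List.pyGetD p.2 0 0)).getD k 0 = LA (pairs.map (fun p => p.2)) k := by
    intro k hk
    rw [hlen1] at hk
    rw [hLA k hk]
    rw [List.getD_eq_getElem?_getD, List.getElem?_map, List.getElem?_eq_getElem hk]
    simp [getElem!_pos, hk]
  have hmono : ∀ a b, a ≤ b → b < (pairs.map (fun p : String × List Int => p.1)).length →
      LA (pairs.map (fun p => p.2)) a ≤ LA (pairs.map (fun p => p.2)) b := by
    intro a b hab hbn
    rw [hlen1] at hbn
    rcases Nat.lt_or_ge a b with hlt | hge
    · have hpw : List.Pairwise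
          (fun p q => PySem.List.pyGetD p.2 0 0 ≤ PySem.List.pyGetD q.2 0 0) pairs := by
        rw [hpairs]
        exact PySem.List.sorted_pairwise (cn.zip lv) (fun p => PySem.List.pyGetD p.2 0 0)
      have hp := List.pairwise_iff_getElem.mp hpw a b (by omega) hbn hlt
      rw [hLA a (by omega), hLA b hbn]
      simpa [getElem!_pos, hbn, show a < pairs.length by omega] using hp
    · have hab' : a = b := by omega
      subst hab'
      exact le_refl _
  have hmain := outerA_loop (pairs.map (fun p => p.1)) (pairs.map (fun p => p.2))
      (pairs.map (fun p => PySem.List.pyGetD p.2 0 0)) th hls hmono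
      (pairs.map (fun p : String × List Int => p.1)).length 0 0
      (List.replicate (pairs.map (fun p : String × List Int => p.1)).length false)
      PySem.Dict.empty (pairs.map (fun p : String × List Int => p.1)).length
      (by omega) (by omega) (by omega) (by omega)
      (by rw [List.length_replicate])
      (by intro k; rw [getD_replicate_false]; simp)
  rw [List.range_eq_range']
  exact hmain

theorem generate_lookup_table_raises : Claim_raises_generate_lookup_table := by
  unfold Claim_raises_generate_lookup_table
  constructor
  · intro cn lv th _ hr hp
    rcases hr with h | h <;> simp [h, Pre_generate_lookup_table] at hp
  · exact ⟨by decide, by decide, by decide⟩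

-- self-check (kept referenced): the witness half of the raises claim, projected out of the theorem above
theorem pvRaisesWitness_ok :
    Dom_generate_lookup_table (pvRaiseWitness_generate_lookup_table.1)
      (pvRaiseWitness_generate_lookup_table.2.1) (pvRaiseWitness_generate_lookup_table.2.2) ∧
    Raises_generate_lookup_table (pvRaiseWitness_generate_lookup_table.1)
      (pvRaiseWitness_generate_lookup_table.2.1) (pvRaiseWitness_generate_lookup_table.2.2) ∧
    generate_lookup_table_alt (pvRaiseWitness_generate_lookup_table.1)
      (pvRaiseWitness_generate_lookup_table.2.1) (pvRaiseWitness_generate_lookup_table.2.2)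
      = pvRaiseWitnessOut_generate_lookup_table :=
  generate_lookup_table_raises.2
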